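-- pv_equiv track=rewrite | github.com/LCSR-lab/MODNET | modnet/modnet/analysis.py | _remove_module_start
-- ===== SOURCE A (Python) =====
-- from typing import Tuple
--
-- def _remove_module_start(lines: list) -> Tuple[list, list]:
--     """
--     """
--     list_module_start = []
--     next_line_break = False
--     for line in lines:
--         if '(' in line:
--             next_line_break = True
--         elif next_line_break:
--             break
--         list_module_start.append(line)
--
--     return lines[len(list_module_start):], list_module_start
-- ===== SOURCE B (Python) =====
-- def _remove_module_start(lines):
--     flags = ['(' in line for line in lines]
--     for i, (cur, nxt) in enumerate(zip(flags, flags[1:])):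
--         if cur and not nxt:
--             return lines[i + 1:], lines[:i + 1]
--     return [], lines
-- ===== Notes on version B (the rewrite author's own statement) =====
-- stated objective: alternative
-- what changed: Replaces the stateful flag-and-append loop with a boolean-stream formulation: map every line to whether it contains '(', then slice at the first True-to-False transition found by scanning adjacent pairs of that stream (zip of the stream with its shift), returning ([], lines) if no such transition exists.
import Mathlib
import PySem

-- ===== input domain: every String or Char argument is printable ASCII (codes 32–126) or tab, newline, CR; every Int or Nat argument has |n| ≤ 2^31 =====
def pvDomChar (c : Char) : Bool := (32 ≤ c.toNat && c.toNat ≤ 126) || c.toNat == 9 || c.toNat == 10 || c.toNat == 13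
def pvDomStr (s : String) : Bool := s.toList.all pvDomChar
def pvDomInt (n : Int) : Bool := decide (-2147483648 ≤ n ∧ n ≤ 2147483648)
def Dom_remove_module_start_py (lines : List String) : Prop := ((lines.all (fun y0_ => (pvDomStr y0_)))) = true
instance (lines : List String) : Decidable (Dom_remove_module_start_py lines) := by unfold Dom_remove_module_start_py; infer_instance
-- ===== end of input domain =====

-- B replaces A's stateful flag-and-append loop with a boolean-stream formulation:
-- map each line to whether it contains '(', then slice at the first True→False
-- transition of adjacent pairs of that stream; same O(n) cost (objective: alternative).

-- ===== PORT A =====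
-- the loop: state = (accumulated prefix built front-to-back, the flag); 'break' = stop recursing
def removeModuleStartLoop (next_line_break : Bool) : List String → List String
  | [] => []
  | line :: rest =>
    if PySem.Str.isIn "(" line then
      line :: removeModuleStartLoop true rest
    else if next_line_break then
      []   -- break (line is NOT appended)
    else
      line :: removeModuleStartLoop next_line_break rest

def remove_module_start_py (lines : List String) : List String × List String :=
  let list_module_start := removeModuleStartLoop false lines
  -- lines[len(list_module_start):] with 0 ≤ len ≤ |lines|: exact as List.drop
  (lines.drop list_module_start.length, list_module_start)

-- ===== PORT B =====
-- the for-loop over enumerate(zip(flags, flags[1:])) with its early return: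
-- recursion over the pair list carrying the running index i
def rmsFindTrans : List (Bool × Bool) → Nat → Option Nat
  | [], _ => none
  | (cur, nxt) :: rest, i => if cur && !nxt then some i else rmsFindTrans rest (i + 1)

def remove_module_start_py_alt (lines : List String) : List String × List String :=
  let flags := lines.map (fun line => PySem.Str.isIn "(" line)
  match rmsFindTrans (flags.zip (flags.drop 1)) 0 with
  | some i => (lines.drop (i + 1), lines.take (i + 1))   -- lines[i+1:], lines[:i+1]
  | none => ([], lines)

-- ===== PRECONDITION & SPEC =====
def Spec_remove_module_start_py (lines : List String) (out : List String × List String) : Prop := out = remove_module_start_py_alt lines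
instance (lines : List String) (out : List String × List String) : Decidable (Spec_remove_module_start_py lines out) := by unfold Spec_remove_module_start_py; infer_instance

-- ===== CLAIM (what is proved, stated in full; the proofs are below) =====
def Claim_equal_remove_module_start_py : Prop := ∀ (lines : List String), Dom_remove_module_start_py lines → Spec_remove_module_start_py lines (remove_module_start_py lines)

-- ===== LEMMAS AND PROOFS =====

-- abbreviation for the predicate '(' ∈ line
def pvHasPar (l : String) : Bool := PySem.Str.isIn "(" l

-- length of the maximal '('-prefix of ls
def pvTwLen : List String → Nat
  | [] => 0
  | l :: ls => if pvHasPar l then pvTwLen ls + 1 else 0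

-- the split index A's loop realises
def pvSIdx : List String → Nat
  | [] => 0
  | l :: ls => if pvHasPar l then pvTwLen ls + 1 else pvSIdx ls + 1

-- the same two quantities on the boolean stream
def pvTwB : List Bool → Nat
  | [] => 0
  | b :: r => if b then pvTwB r + 1 else 0

def pvSB : List Bool → Nat
  | [] => 0
  | b :: r => if b then pvTwB r + 1 else pvSB r + 1

theorem pvTwLen_le (ls : List String) : pvTwLen ls ≤ ls.length := by
  induction ls with
  | nil => simp [pvTwLen]
  | cons a as iha => simp only [pvTwLen, List.length_cons]; split <;> omega

theorem pvSIdx_le (ls : List String) : pvSIdx ls ≤ ls.length := by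
  induction ls with
  | nil => simp [pvSIdx]
  | cons l ls ih =>
    have h := pvTwLen_le ls
    simp only [pvSIdx, List.length_cons]
    split <;> omega

theorem loop_true_eq (ls : List String) :
    removeModuleStartLoop true ls = ls.take (pvTwLen ls) := by
  induction ls with
  | nil => rfl
  | cons l ls ih =>
    rw [removeModuleStartLoop, show PySem.Str.isIn "(" l = pvHasPar l from rfl, pvTwLen]
    cases h : pvHasPar l <;> simp [ih]

theorem loop_false_eq (ls : List String) :
    removeModuleStartLoop false ls = ls.take (pvSIdx ls) := by
  induction ls with
  | nil => rfl
  | cons l ls ih =>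
    rw [removeModuleStartLoop, show PySem.Str.isIn "(" l = pvHasPar l from rfl, pvSIdx]
    cases h : pvHasPar l <;> simp [ih, loop_true_eq]

theorem twLen_map (ls : List String) : pvTwLen ls = pvTwB (ls.map pvHasPar) := by
  induction ls with
  | nil => rfl
  | cons l ls ih => simp only [pvTwLen, List.map_cons, pvTwB]; rw [ih]

theorem sIdx_map (ls : List String) : pvSIdx ls = pvSB (ls.map pvHasPar) := by
  induction ls with
  | nil => rfl
  | cons l ls ih => simp only [pvSIdx, List.map_cons, pvSB]; rw [ih, twLen_map]

-- the running index of the early-return loop is an offset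
theorem rmsFindTrans_offset (l : List (Bool × Bool)) (i : Nat) :
    rmsFindTrans l i = (rmsFindTrans l 0).map (· + i) := by
  induction l generalizing i with
  | nil => rfl
  | cons p rest ih =>
    obtain ⟨cur, nxt⟩ := p
    simp only [rmsFindTrans]
    split
    · simp
    · rw [ih (i + 1), ih 1, Option.map_map]
      cases rmsFindTrans rest 0 <;> simp <;> omega

-- the first True→False transition determines A's split index
theorem trans_char (bs : List Bool) :
    pvSB bs = (match rmsFindTrans (bs.zip (bs.drop 1)) 0 with
      | none => bs.length
      | some i => i + 1) := by
  induction bs with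
  | nil => rfl
  | cons a bs ih =>
    cases bs with
    | nil => cases a <;> rfl
    | cons b r =>
      have hz : (a :: b :: r).zip ((a :: b :: r).drop 1)
          = (a, b) :: ((b :: r).zip ((b :: r).drop 1)) := by simp
      rw [hz, rmsFindTrans]
      by_cases hab : (a && !b) = true
      · obtain ⟨ha, hb⟩ : a = true ∧ b = false := by
          cases a <;> cases b <;> simp_all
        subst ha; subst hb
        simp [pvSB, pvTwB]
      · have hstep : pvSB (a :: b :: r) = pvSB (b :: r) + 1 := by
          cases a <;> cases b <;> simp_all [pvSB, pvTwB]
        rw [if_neg hab, rmsFindTrans_offset, hstep, ih]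
        cases rmsFindTrans ((b :: r).zip ((b :: r).drop 1)) 0 <;> simp <;> omega

theorem alt_eq (lines : List String) :
    remove_module_start_py_alt lines
      = (lines.drop (pvSIdx lines), lines.take (pvSIdx lines)) := by
  rw [remove_module_start_py_alt]
  have h := trans_char (lines.map pvHasPar)
  rw [sIdx_map]
  show (match rmsFindTrans (((lines.map pvHasPar)).zip ((lines.map pvHasPar).drop 1)) 0 with
      | some i => (lines.drop (i + 1), lines.take (i + 1))
      | none => ([], lines)) = _
  cases hf : rmsFindTrans ((lines.map pvHasPar).zip ((lines.map pvHasPar).drop 1)) 0 with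
  | none =>
    rw [hf] at h
    have hl : pvSB (lines.map pvHasPar) = lines.length := by simpa using h
    simp [hl]
  | some i =>
    rw [hf] at h
    simp [h]

-- ===== VERDICT (by name: the statement is the Claim_ definition above) =====
theorem remove_module_start_py_spec : Claim_equal_remove_module_start_py := by
  intro lines _
  unfold Spec_remove_module_start_py
  rw [alt_eq]
  simp only [remove_module_start_py, loop_false_eq]
  simp [Nat.min_eq_left (pvSIdx_le lines)]
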